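-- pv_equiv track=rewrite | github.com/NaxonM/Altomatic | src/altomatic/ui/ui_toolkit.py | _build_prompt_display_map
-- ===== SOURCE A (Python) =====
-- from collections import Counter
--
-- def _build_prompt_display_map(prompts: dict[str, dict]) -> dict[str, str]:
--     """Return display labels that remain unique even when prompt labels repeat."""
--     labels = [entry.get("label") or key for key, entry in prompts.items()]
--     counts = Counter(labels)
--     display_map: dict[str, str] = {}
--     for key, entry in prompts.items():
--         label = entry.get("label") or key
--         display_map[key] = f"{label} — {key}" if counts[label] > 1 else label
--     return display_map
-- ===== SOURCE B (Python) =====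
-- def _build_prompt_display_map(prompts: dict[str, dict]) -> dict[str, str]:
--     """Return display labels that remain unique even when prompt labels repeat."""
--     def display(key, entry):
--         label = entry.get("label") or key
--         if any(k != key and (e.get("label") or k) == label for k, e in prompts.items()):
--             return f"{label} — {key}"
--         return label
--     return {key: display(key, entry) for key, entry in prompts.items()}
-- ===== Notes on version B (the rewrite author's own statement) =====
-- stated objective: alternative
-- what changed: Replaces A's Counter build plus a second counted pass with a single dict comprehension that decorates a label by scanning whether any OTHER entry resolves to the same label (no counting structure at all).
import Mathlib
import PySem

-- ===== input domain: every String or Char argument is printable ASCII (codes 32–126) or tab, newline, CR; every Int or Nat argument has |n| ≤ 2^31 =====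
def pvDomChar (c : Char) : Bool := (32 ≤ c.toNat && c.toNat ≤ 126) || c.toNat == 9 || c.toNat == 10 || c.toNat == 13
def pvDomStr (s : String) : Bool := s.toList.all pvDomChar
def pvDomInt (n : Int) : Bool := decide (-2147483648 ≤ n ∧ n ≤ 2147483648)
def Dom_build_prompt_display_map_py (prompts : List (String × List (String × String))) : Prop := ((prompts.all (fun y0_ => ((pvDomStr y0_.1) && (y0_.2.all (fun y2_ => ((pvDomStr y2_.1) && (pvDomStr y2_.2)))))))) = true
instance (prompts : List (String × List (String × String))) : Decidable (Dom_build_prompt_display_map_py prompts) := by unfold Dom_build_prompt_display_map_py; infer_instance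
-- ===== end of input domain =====

-- B replaces A's Counter-plus-second-pass with a single comprehension that decides each
-- label's decoration by scanning for another entry with the same resolved label (alternative decomposition, no counting structure).


-- ===== PORT A =====
-- entry.get("label") or key  (None or "" are falsy)
def pvResolveLabel (key : String) (entry : List (String × String)) : String :=
  match (PySem.Dict.ofList entry).get? "label" with
  | some v => if v == "" then key else v
  | none => key

def build_prompt_display_map_py (prompts : List (String × List (String × String))) : List (String × String) :=
  let labels := prompts.map (fun p => pvResolveLabel p.1 p.2)
  let counts := PySem.Dict.counter labels
  let display_map : PySem.Dict String String :=
    prompts.foldl (fun dm p =>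
      let label := pvResolveLabel p.1 p.2
      dm.insert p.1 (if counts.getD label 0 > 1 then label ++ " — " ++ p.1 else label))
      PySem.Dict.empty
  display_map.items

-- ===== PORT B =====
def pvDisplay (prompts : List (String × List (String × String))) (key : String) (entry : List (String × String)) : String :=
  let label := pvResolveLabel key entry
  if prompts.any (fun q => q.1 != key && (pvResolveLabel q.1 q.2 == label)) then
    label ++ " — " ++ key
  else
    label

def build_prompt_display_map_py_alt (prompts : List (String × List (String × String))) : List (String × String) :=
  prompts.map (fun p => (p.1, pvDisplay prompts p.1 p.2))

-- ===== PRECONDITION & SPEC =====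
-- Pre_ excludes association lists with duplicate keys: A's parameter is a Python dict, in which
-- duplicate keys cannot occur, so the list-level behaviour there is not specified by A.
def Pre_build_prompt_display_map_py (prompts : List (String × List (String × String))) : Prop :=
  (prompts.map Prod.fst).Nodup
instance (prompts : List (String × List (String × String))) : Decidable (Pre_build_prompt_display_map_py prompts) := by unfold Pre_build_prompt_display_map_py; infer_instance

def pvWitness_build_prompt_display_map_py : (List (String × List (String × String))) :=
  [("a", [("label", "x")]), ("b", []), ("c", [("label", "x")])]

def Spec_build_prompt_display_map_py (prompts : List (String × List (String × String))) (out : List (String × String)) : Prop := out = build_prompt_display_map_py_alt prompts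
instance (prompts : List (String × List (String × String))) (out : List (String × String)) : Decidable (Spec_build_prompt_display_map_py prompts out) := by unfold Spec_build_prompt_display_map_py; infer_instance

-- ===== CLAIM (what is proved, stated in full; the proofs are below) =====
def Claim_equal_build_prompt_display_map_py : Prop := ∀ (prompts : List (String × List (String × String))), Dom_build_prompt_display_map_py prompts → Pre_build_prompt_display_map_py prompts → Spec_build_prompt_display_map_py prompts (build_prompt_display_map_py prompts)

-- ===== LEMMAS AND PROOFS =====

-- distinct keys make the pairs themselves injective on membership
theorem pv_eq_of_fst_eq {α β : Type} {l : List (α × β)}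
    (h : (l.map Prod.fst).Nodup) {p q : α × β} (hp : p ∈ l) (hq : q ∈ l)
    (hfst : p.1 = q.1) : p = q :=
  List.inj_on_of_nodup_map h hp hq hfst

-- the pointwise heart: "this label occurs more than once" = "some OTHER key resolves to it"
theorem pv_count_iff_other {l : List (String × List (String × String))}
    (hnd : (l.map Prod.fst).Nodup) {p : String × List (String × String)} (hp : p ∈ l) :
    (1 < (l.map (fun q => pvResolveLabel q.1 q.2)).count (pvResolveLabel p.1 p.2)) ↔
    (∃ q ∈ l, q.1 ≠ p.1 ∧ pvResolveLabel q.1 q.2 = pvResolveLabel p.1 p.2) := by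
  classical
  set res : String × List (String × String) → String := fun q => pvResolveLabel q.1 q.2 with hres
  have hcount : (l.map res).count (res p) = (l.filter (fun q => res q == res p)).length := by
    rw [List.count_eq_countP, List.countP_map, List.countP_eq_length_filter]; rfl
  have hlnd : l.Nodup := List.Nodup.of_map _ hnd
  have hFnd : (l.filter (fun q => res q == res p)).Nodup := hlnd.filter _
  have hpF : p ∈ l.filter (fun q => res q == res p) := by
    simp [List.mem_filter, hp]
  constructor
  · intro h1
    rw [hcount] at h1
    obtain ⟨q, hq⟩ := List.exists_mem_of_length_pos
      (l := (l.filter (fun q => res q == res p)).erase p)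
      (by rw [List.length_erase_of_mem hpF]; omega)
    have hqF : q ∈ l.filter (fun q => res q == res p) := List.mem_of_mem_erase hq
    have hqne : q ≠ p := (List.Nodup.mem_erase_iff hFnd |>.mp hq).1
    have hql : q ∈ l := (List.mem_filter.mp hqF).1
    have hqr : res q = res p := by
      have := (List.mem_filter.mp hqF).2; simpa using this
    refine ⟨q, hql, ?_, hqr⟩
    intro hk
    exact hqne (pv_eq_of_fst_eq hnd hql hp hk)
  · rintro ⟨q, hql, hkne, hqr⟩
    have hqr' : res q = res p := hqr
    have hqF : q ∈ l.filter (fun q => res q == res p) :=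
      List.mem_filter.mpr ⟨hql, by simp [hqr']⟩
    have hqp : q ≠ p := fun h => hkne (by rw [h])
    have hpE : p ∈ (l.filter (fun q => res q == res p)).erase q :=
      (List.Nodup.mem_erase_iff hFnd).mpr ⟨fun h => hqp h.symm, hpF⟩
    have h1 : 1 ≤ ((l.filter (fun q => res q == res p)).erase q).length :=
      List.length_pos_of_mem hpE
    have h2 := List.length_erase_of_mem hqF
    rw [hcount]
    omega

-- ===== VERDICT (by name: the statement is the Claim_ definition above) =====
theorem build_prompt_display_map_py_spec : Claim_equal_build_prompt_display_map_py := by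
  intro prompts _hdom hpre
  unfold Spec_build_prompt_display_map_py build_prompt_display_map_py build_prompt_display_map_py_alt
  have hfresh : ∀ p ∈ prompts, (PySem.Dict.empty : PySem.Dict String String).contains p.1 = false := by
    intro p _; rfl
  rw [PySem.Dict.items_foldl_insert_fresh _ _ _ _ hfresh (by simpa using hpre)]
  simp only [PySem.Dict.empty, List.nil_append]
  refine List.map_congr_left ?_
  intro p hp
  have key := pv_count_iff_other hpre hp
  have hcnt : (PySem.Dict.counter (prompts.map (fun q => pvResolveLabel q.1 q.2))).getD
      (pvResolveLabel p.1 p.2) 0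
      = ((prompts.map (fun q => pvResolveLabel q.1 q.2)).count (pvResolveLabel p.1 p.2) : Int) :=
    PySem.Dict.getD_counter _ _
  have hany : (prompts.any (fun q => q.1 != p.1 && (pvResolveLabel q.1 q.2 == pvResolveLabel p.1 p.2)) = true)
      ↔ (∃ q ∈ prompts, q.1 ≠ p.1 ∧ pvResolveLabel q.1 q.2 = pvResolveLabel p.1 p.2) := by
    simp [List.any_eq_true]
  unfold pvDisplay
  simp only [hcnt]
  by_cases hc : ∃ q ∈ prompts, q.1 ≠ p.1 ∧ pvResolveLabel q.1 q.2 = pvResolveLabel p.1 p.2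
  · have h1 : 1 < (prompts.map (fun q => pvResolveLabel q.1 q.2)).count (pvResolveLabel p.1 p.2) :=
      key.mpr hc
    have hI : (1 : Int) < ((prompts.map (fun q => pvResolveLabel q.1 q.2)).count (pvResolveLabel p.1 p.2) : Int) := by
      exact_mod_cast h1
    have h2 : prompts.any (fun q => q.1 != p.1 && (pvResolveLabel q.1 q.2 == pvResolveLabel p.1 p.2)) = true :=
      hany.mpr hc
    simp [h2, hI]
  · have h1 : ¬ 1 < (prompts.map (fun q => pvResolveLabel q.1 q.2)).count (pvResolveLabel p.1 p.2) :=
      fun h => hc (key.mp h)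
    have hI : ¬ (1 : Int) < ((prompts.map (fun q => pvResolveLabel q.1 q.2)).count (pvResolveLabel p.1 p.2) : Int) := by
      exact_mod_cast h1
    have h2 : ¬ prompts.any (fun q => q.1 != p.1 && (pvResolveLabel q.1 q.2 == pvResolveLabel p.1 p.2)) = true :=
      fun h => hc (hany.mp h)
    simp [h2, hI]
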